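-- pv_equiv track=rewrite | github.com/sragvivadali/IntelliTrip | model.py | splitByDay
-- ===== SOURCE A (Python) =====
-- def splitByDay(plan):
--   arr = []
--   start = 0
--
--   for i in range(len(plan)):
--       if plan[i:i+5] == '\nDay ':
--           arr.append(plan[start:i-1])
--           start = i
--
--   arr.append(plan[start:])
--   arr.pop(0)
--   return arr
-- ===== SOURCE B (Python) =====
-- def splitByDay(plan):
--     parts = plan.split('\nDay ')
--     tails = ['\nDay ' + part for part in parts[1:]]
--     return [t[:-1] for t in tails[:-1]] + tails[-1:]
-- ===== Notes on version B (the rewrite author's own statement) =====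
-- stated objective: simpler
-- what changed: Replaced A's char-by-char scan that compares a 5-char slice at every index, appends the chunk behind each marker and pops the leading junk chunk, with a split-and-reassemble pass: split the plan on the day marker, re-prefix each piece after the first with the marker, and trim the final char of every piece but the last.
import Mathlib
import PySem

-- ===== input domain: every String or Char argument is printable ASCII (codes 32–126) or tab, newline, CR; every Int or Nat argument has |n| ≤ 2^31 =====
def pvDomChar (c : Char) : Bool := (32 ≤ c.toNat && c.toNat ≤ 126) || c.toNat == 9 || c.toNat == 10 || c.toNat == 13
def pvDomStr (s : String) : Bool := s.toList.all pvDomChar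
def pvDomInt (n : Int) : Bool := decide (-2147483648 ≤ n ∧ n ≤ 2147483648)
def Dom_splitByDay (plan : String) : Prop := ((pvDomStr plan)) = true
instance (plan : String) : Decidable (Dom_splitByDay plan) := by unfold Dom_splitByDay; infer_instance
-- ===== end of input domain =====

-- B replaces A's char-by-char scan (which appends the chunk BEHIND each marker and pops the
-- leading junk chunk) with a split-and-reassemble pass: plan.split('\nDay '), re-prefix each
-- piece after the first with the marker, trim the last char of every piece but the last
-- (objective: simpler — no index arithmetic and no explicit scan at all).

-- the marker '\nDay ' (shared literal data)
def pvMarker : List Char := ['\n', 'D', 'a', 'y', ' ']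

-- ===== PORT A =====
def splitByDay (plan : String) : List String :=
  let cs := plan.toList
  -- for i in range(len(plan)): if plan[i:i+5] == '\nDay ': arr.append(plan[start:i-1]); start = i
  let st := (PySem.List.pyRange 0 (PySem.List.len cs) 1).foldl
    (fun (s : List (List Char) × Int) i =>
      if PySem.List.slice cs (some i) (some (i + 5)) = pvMarker then
        (s.1 ++ [PySem.List.slice cs (some s.2) (some (i - 1))], i)
      else s) ([], 0)
  -- arr.append(plan[start:]); arr.pop(0)  (arr is nonempty here, so pop(0) leaves arr.drop 1)
  let arr := st.1 ++ [PySem.List.slice cs (some st.2) none]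
  (arr.drop 1).map String.ofList

-- ===== PORT B =====
def splitByDay_alt (plan : String) : List String :=
  let cs := plan.toList
  -- parts = plan.split('\nDay ')
  let parts := PySem.Chars.splitOn cs pvMarker
  -- tails = ['\nDay ' + part for part in parts[1:]]
  let tails := (PySem.List.slice parts (some 1) none).map (fun part => pvMarker ++ part)
  -- return [t[:-1] for t in tails[:-1]] + tails[-1:]
  ((PySem.List.slice tails none (some (-1))).map
      (fun t => String.ofList (PySem.List.slice t none (some (-1)))))
    ++ (PySem.List.slice tails (some (-1)) none).map String.ofList

-- ===== PRECONDITION & SPEC =====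
def Spec_splitByDay (plan : String) (out : List String) : Prop := out = splitByDay_alt plan
instance (plan : String) (out : List String) : Decidable (Spec_splitByDay plan out) := by unfold Spec_splitByDay; infer_instance

-- ===== CLAIM (what is proved, stated in full; the proofs are below) =====
def Claim_equal_splitByDay : Prop := ∀ (plan : String), Dom_splitByDay plan → Spec_splitByDay plan (splitByDay plan)

-- ===== LEMMAS AND PROOFS =====

-- generic slice facts: xs[:-1] and xs[-1:]
theorem pvSlice_dropLast {α : Type} (l : List α) : PySem.List.slice l none (some (-1)) = l.dropLast := by
  rcases l with _ | ⟨c, t⟩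
  · rfl
  · simp [PySem.List.slice, PySem.List.clampIdx, List.dropLast_eq_take]
    split_ifs <;> omega

theorem pvSlice_one {α : Type} (l : List α) : PySem.List.slice l (some 1) none = l.drop 1 := by
  rcases l with _ | ⟨c, t⟩ <;> simp [PySem.List.slice, PySem.List.clampIdx]

theorem pvSlice_lastSingleton {α : Type} (l : List α) (h : l ≠ []) :
    PySem.List.slice l (some (-1)) none = [l.getLast h] := by
  have hl : 0 < l.length := List.length_pos_iff.mpr h
  simp [PySem.List.slice, PySem.List.clampIdx]
  rw [if_neg h]
  rw [show ((l.length : Int) + -1).toNat = l.length - 1 from by omega,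
      show l.length - (l.length - 1) = 1 from by omega,
      List.getLast_eq_getElem, List.take_one, List.head?_drop]
  simp [List.getElem?_eq_getElem (show l.length - 1 < l.length from by omega)]

-- the chunk list produced from a current start position and the remaining marker positions
def pvChunksFrom (cs : List Char) (s : Int) : List Nat → List (List Char)
  | [] => [PySem.List.slice cs (some s) none]
  | p :: ps => PySem.List.slice cs (some s) (some ((p : Int) - 1)) :: pvChunksFrom cs (p : Int) ps

-- A's loop over the marker positions builds exactly the chunks-from list
theorem pvFold_eq (cs : List Char) (P : List Nat) : ∀ (acc : List (List Char)) (s : Int),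
    (P.foldl (fun (st : List (List Char) × Int) (k : Nat) =>
        (st.1 ++ [PySem.List.slice cs (some st.2) (some ((k : Int) - 1))], (k : Int))) (acc, s)).1
      ++ [PySem.List.slice cs (some ((P.foldl (fun (st : List (List Char) × Int) (k : Nat) =>
        (st.1 ++ [PySem.List.slice cs (some st.2) (some ((k : Int) - 1))], (k : Int))) (acc, s)).2)) none]
    = acc ++ pvChunksFrom cs s P := by
  induction P with
  | nil => intro acc s; simp [pvChunksFrom]
  | cons p ps ih =>
    intro acc s
    simp only [List.foldl_cons]
    rw [ih]
    simp [pvChunksFrom]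

-- A's slice test at k is 'the marker starts at k'
theorem pvPred_iff (cs : List Char) (k : Nat) :
    PySem.List.slice cs (some (k : Int)) (some ((k : Int) + 5)) = pvMarker ↔ pvMarker <+: cs.drop k := by
  have h5 : ((k : Int) + 5) = ((k + 5 : Nat) : Int) := by push_cast; ring
  have hl : pvMarker.length = 5 := rfl
  rw [h5, PySem.List.slice_natCast, show (k + 5) - k = 5 from by omega,
    List.prefix_iff_eq_take, hl, eq_comm]

-- the greedy split recursion that str.split performs (proof-side mirror of splitOn.go)
def pvSpl : List Char → List (List Char)
  | [] => [[]]
  | c :: rest =>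
    if pvMarker.isPrefixOf (c :: rest) then
      [] :: pvSpl (rest.drop 4)
    else
      match pvSpl rest with
      | [] => [[c]]
      | x :: xs => (c :: x) :: xs
termination_by l => l.length
decreasing_by
  all_goals simp

theorem pvSpl_nil : pvSpl [] = [[]] := by rw [pvSpl.eq_def]

theorem pvSpl_ne_nil (l : List Char) : pvSpl l ≠ [] := by
  cases l with
  | nil => simp [pvSpl_nil]
  | cons c rest =>
    rw [pvSpl.eq_def]
    dsimp only
    split_ifs
    · simp
    · cases h : pvSpl rest <;> simp

theorem pvSpl_pos (l : List Char) (hp : pvMarker <+: l) : pvSpl l = [] :: pvSpl (l.drop 5) := by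
  cases l with
  | nil => exact absurd (List.prefix_nil.mp hp) (by simp [pvMarker])
  | cons c rest =>
    rw [pvSpl.eq_def]
    simp only [if_pos (List.isPrefixOf_iff_prefix.mpr hp)]
    rfl

theorem pvSpl_neg (c : Char) (rest : List Char) (hp : ¬ pvMarker <+: (c :: rest)) :
    pvSpl (c :: rest) = (c :: (pvSpl rest).headI) :: (pvSpl rest).tail := by
  rw [pvSpl.eq_def]
  simp only [if_neg (fun hc => hp (List.isPrefixOf_iff_prefix.mp hc))]
  obtain ⟨x, xs, hxs⟩ := List.exists_cons_of_ne_nil (pvSpl_ne_nil rest)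
  rw [hxs]
  rfl

-- unfolding equations for splitOn's fuel loop
theorem pvGo_succ_nil (sep cur : List Char) (f : Nat) (acc : List (List Char)) :
    PySem.Chars.splitOn.go sep (f + 1) [] cur acc = (cur.reverse :: acc).reverse := rfl

theorem pvGo_succ_cons (sep cur : List Char) (c : Char) (rest : List Char) (f : Nat) (acc : List (List Char)) :
    PySem.Chars.splitOn.go sep (f + 1) (c :: rest) cur acc =
      if sep.isPrefixOf (c :: rest) then
        PySem.Chars.splitOn.go sep f ((c :: rest).drop sep.length) [] (cur.reverse :: acc)
      else PySem.Chars.splitOn.go sep f rest (c :: cur) acc := rfl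

-- the fuel loop computes the greedy split recursion
theorem pvGo_spl : ∀ (fuel : Nat) (l cur : List Char) (acc : List (List Char)), l.length < fuel →
    PySem.Chars.splitOn.go pvMarker fuel l cur acc
      = acc.reverse ++ ((cur.reverse ++ (pvSpl l).headI) :: (pvSpl l).tail) := by
  intro fuel
  induction fuel with
  | zero => intro l cur acc h; omega
  | succ f ih =>
    intro l cur acc h
    cases l with
    | nil => simp [pvGo_succ_nil, pvSpl_nil]
    | cons c rest =>
      rw [pvGo_succ_cons]
      by_cases hp : pvMarker <+: (c :: rest)
      · rw [if_pos (List.isPrefixOf_iff_prefix.mpr hp)]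
        rw [ih _ _ _ (by simp [pvMarker] at h ⊢; omega)]
        rw [pvSpl_pos _ hp]
        obtain ⟨x, xs, hxs⟩ := List.exists_cons_of_ne_nil (pvSpl_ne_nil ((c :: rest).drop 5))
        simp only [show (c :: rest).drop pvMarker.length = (c :: rest).drop 5 from rfl,
          show (c :: rest).drop 5 = rest.drop 4 from rfl] at hxs ⊢
        simp [hxs]
      · rw [if_neg (fun hc => hp (List.isPrefixOf_iff_prefix.mp hc))]
        rw [ih _ _ _ (by simp at h ⊢; omega)]
        rw [pvSpl_neg _ _ hp]
        obtain ⟨x, xs, hxs⟩ := List.exists_cons_of_ne_nil (pvSpl_ne_nil rest)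
        simp [hxs]

theorem pvSplitOn_eq (cs : List Char) : PySem.Chars.splitOn cs pvMarker = pvSpl cs := by
  show PySem.Chars.splitOn.go pvMarker (cs.length + 1) cs [] [] = pvSpl cs
  rw [pvGo_spl _ _ _ _ (by omega)]
  obtain ⟨x, xs, hxs⟩ := List.exists_cons_of_ne_nil (pvSpl_ne_nil cs)
  simp [hxs]

-- two occurrences of '\nDay ' cannot overlap (the marker has no proper border)
theorem pvNoOverlap (cs : List Char) (s t : Nat) (hs : pvMarker <+: cs.drop s)
    (h1 : s < t) (h2 : t < s + 5) : ¬ pvMarker <+: cs.drop t := by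
  intro hcon
  obtain ⟨u, hu⟩ := hs
  obtain ⟨v, hv⟩ := hcon
  have hdt : cs.drop t = (pvMarker ++ u).drop (t - s) := by
    rw [hu, List.drop_drop, show s + (t - s) = t from by omega]
  rw [hdt] at hv
  have hj : t - s = 1 ∨ t - s = 2 ∨ t - s = 3 ∨ t - s = 4 := by omega
  rcases hj with hj | hj | hj | hj <;> rw [hj] at hv <;> simp [pvMarker] at hv

-- a marker at s fits inside cs
theorem pvFit (cs : List Char) (s : Nat) (hs : pvMarker <+: cs.drop s) : s + 5 ≤ cs.length := by
  have := hs.length_le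
  simp [pvMarker] at this
  omega

-- the parts of the split, described by the list of marker positions
def pvParts (cs : List Char) : Nat → List Nat → List (List Char)
  | s, [] => [cs.drop s]
  | s, q :: qs => (cs.drop s).take (q - s) :: pvParts cs (q + 5) qs

-- the greedy split equals the position-indexed parts
theorem pvSpl_parts (cs : List Char) : ∀ (d s : Nat), cs.length - s ≤ d →
    pvSpl (cs.drop s)
      = pvParts cs s ((List.range' s (cs.length - s)).filter
          (fun k => decide (pvMarker <+: cs.drop k))) := by
  intro d
  induction d with
  | zero =>
    intro s h
    have hs : cs.length ≤ s := by omega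
    rw [List.drop_eq_nil_of_le hs, show cs.length - s = 0 from by omega]
    simp [pvSpl, pvParts, List.drop_eq_nil_of_le hs]
  | succ d ih =>
    intro s h
    by_cases hsl : cs.length ≤ s
    · rw [List.drop_eq_nil_of_le hsl, show cs.length - s = 0 from by omega]
      simp [pvSpl_nil, pvParts, List.drop_eq_nil_of_le hsl]
    · rw [Nat.not_le] at hsl
      by_cases hp : pvMarker <+: cs.drop s
      · -- a marker starts at s
        have h5 : s + 5 ≤ cs.length := pvFit cs s hp
        rw [pvSpl_pos _ hp, List.drop_drop, show s + 5 = s + 5 from rfl]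
        rw [ih (s + 5) (by omega)]
        -- split the position range at s+5
        have hsplit : cs.length - s = 5 + (cs.length - (s + 5)) := by omega
        rw [hsplit, ← List.range'_append (s := s) (m := 5) (n := cs.length - (s + 5)) (step := 1)]
        rw [List.filter_append, show s + 1 * 5 = s + 5 from by omega]
        have hr5 : List.range' s 5 = [s, s + 1, s + 2, s + 3, s + 4] := by
          simp [List.range']
        have f1 := decide_eq_false (pvNoOverlap cs s (s + 1) hp (by omega) (by omega))
        have f2 := decide_eq_false (pvNoOverlap cs s (s + 2) hp (by omega) (by omega))
        have f3 := decide_eq_false (pvNoOverlap cs s (s + 3) hp (by omega) (by omega))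
        have f4 := decide_eq_false (pvNoOverlap cs s (s + 4) hp (by omega) (by omega))
        rw [hr5]
        simp only [List.filter_cons, List.filter_nil, f1, f2, f3, f4,
          decide_eq_true hp, if_true, if_false, Bool.false_eq_true]
        simp [pvParts]
      · -- no marker at s: step one character
        obtain ⟨c, rest, hd⟩ : ∃ c rest, cs.drop s = c :: rest := by
          cases hdd : cs.drop s with
          | nil => exact absurd (List.drop_eq_nil_iff.mp hdd) (by omega)
          | cons c rest => exact ⟨c, rest, rfl⟩
        have hrest : rest = cs.drop (s + 1) := by
          rw [← List.tail_drop, hd]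
          rfl
        rw [hd, pvSpl_neg c rest (hd ▸ hp), hrest, ih (s + 1) (by omega)]
        have hstep : cs.length - s = (cs.length - (s + 1)) + 1 := by omega
        rw [hstep, List.range'_succ, List.filter_cons, decide_eq_false hp]
        simp only [Bool.false_eq_true, if_false]
        cases hP : (List.range' (s + 1) (cs.length - (s + 1))).filter
            (fun k => decide (pvMarker <+: cs.drop k)) with
        | nil =>
          simp [pvParts, hd, hrest]
        | cons q qs =>
          have hq : s + 1 ≤ q := by
            have : q ∈ List.range' (s + 1) (cs.length - (s + 1)) :=
              (List.mem_filter.mp (hP ▸ List.mem_cons_self)).1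
            exact (List.mem_range'_1.mp this).1
          simp only [pvParts, List.headI, List.tail]
          rw [show q - s = (q - (s + 1)) + 1 from by omega, hd, List.take_succ_cons, hrest]

-- the full tails (marker re-attached): chunk list from each marker to the next
def pvFull (cs : List Char) : Nat → List Nat → List (List Char)
  | p, [] => [cs.drop p]
  | p, q :: qs => (cs.drop p).take (q - p) :: pvFull cs q qs

theorem pvFull_ne_nil (cs : List Char) (p : Nat) (ps : List Nat) : pvFull cs p ps ≠ [] := by
  cases ps <;> simp [pvFull]

-- a marker at p: cs.drop p = marker ++ cs.drop (p+5)
theorem pvDropMarker (cs : List Char) (p : Nat) (hp : pvMarker <+: cs.drop p) :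
    cs.drop p = pvMarker ++ cs.drop (p + 5) := by
  obtain ⟨u, hu⟩ := hp
  have hu5 : cs.drop (p + 5) = u := by
    rw [← List.drop_drop, ← hu, ← show pvMarker.length = 5 from rfl, List.drop_left]
  rw [hu5, ← hu]

-- re-attaching the marker to each later part gives the full chunks
theorem pvTails_eq (cs : List Char) : ∀ (ps : List Nat) (p : Nat),
    (∀ q ∈ p :: ps, pvMarker <+: cs.drop q) →
    (p :: ps).Pairwise (fun a b => a + 5 ≤ b) →
    (pvParts cs (p + 5) ps).map (fun t => pvMarker ++ t) = pvFull cs p ps := by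
  intro ps
  induction ps with
  | nil =>
    intro p hpred _
    simp [pvParts, pvFull, ← pvDropMarker cs p (hpred p (by simp))]
  | cons q qs ih =>
    intro p hpred hpw
    have hgap : p + 5 ≤ q := (List.pairwise_cons.mp hpw).1 q (by simp)
    simp only [pvParts, pvFull, List.map_cons]
    refine List.cons_eq_cons.mpr ⟨?_, ?_⟩
    · rw [pvDropMarker cs p (hpred p (by simp)), List.take_append,
        List.take_of_length_le (show pvMarker.length ≤ q - p from by simp [pvMarker]; omega)]
      congr 2
    · exact ih q (fun r hr => hpred r (by simp at hr ⊢; tauto))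
        (hpw.sublist (by simp))

-- trimming the last char of every chunk but the last yields A's chunk list
theorem pvFull_chunks (cs : List Char) : ∀ (ps : List Nat) (p : Nat),
    (∀ q ∈ ps, q < cs.length) →
    (p :: ps).Pairwise (fun a b => a + 5 ≤ b) →
    ((pvFull cs p ps).dropLast.map List.dropLast)
        ++ [(pvFull cs p ps).getLast (pvFull_ne_nil cs p ps)]
      = pvChunksFrom cs (p : Int) ps := by
  intro ps
  induction ps with
  | nil =>
    intro p _ _
    simp [pvFull, pvChunksFrom, PySem.List.slice_from (a := (p : Int)) cs (Int.natCast_nonneg p)]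
  | cons q qs ih =>
    intro p hlt hpw
    have hgap : p + 5 ≤ q := (List.pairwise_cons.mp hpw).1 q (by simp)
    have hq : q < cs.length := hlt q (by simp)
    simp only [pvFull, List.dropLast_cons_of_ne_nil (pvFull_ne_nil cs q qs), List.map_cons,
      List.getLast_cons (pvFull_ne_nil cs q qs), List.cons_append]
    rw [ih q (fun r hr => hlt r (by simp [hr])) (hpw.sublist (by simp))]
    simp only [pvChunksFrom]
    congr 1
    -- ((cs.drop p).take (q-p)).dropLast = cs[p : q-1]
    have hlen : ((cs.drop p).take (q - p)).length = q - p := by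
      simp
      omega
    rw [List.dropLast_eq_take, hlen, List.take_take,
      show min (q - p - 1) (q - p) = q - p - 1 from by omega]
    rw [show ((q : Int) - 1) = ((q - 1 : Nat) : Int) from by omega, PySem.List.slice_natCast]
    congr 1
    omega

-- the reassembled split equals A's chunk list, for any admissible position list
theorem pvMain (cs : List Char) (P : List Nat)
    (hmem : ∀ q ∈ P, pvMarker <+: cs.drop q ∧ q < cs.length)
    (hpw : P.Pairwise (fun a b => a + 5 ≤ b)) :
    ((pvChunksFrom cs 0 P).drop 1).map String.ofList
      = ((PySem.List.slice
            ((PySem.List.slice (pvParts cs 0 P) (some 1) none).map (fun part => pvMarker ++ part))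
            none (some (-1))).map
          (fun t => String.ofList (PySem.List.slice t none (some (-1)))))
        ++ (PySem.List.slice
            ((PySem.List.slice (pvParts cs 0 P) (some 1) none).map (fun part => pvMarker ++ part))
            (some (-1)) none).map String.ofList := by
  cases P with
  | nil =>
    simp only [pvChunksFrom, pvParts]
    rw [pvSlice_one]
    simp [PySem.List.slice, PySem.List.clampIdx]
  | cons p ps =>
    simp only [pvChunksFrom, pvParts, List.drop_succ_cons, List.drop_zero]
    rw [pvSlice_one]
    simp only [List.drop_succ_cons, List.drop_zero]
    rw [pvTails_eq cs ps p (fun q hq => (hmem q hq).1) hpw]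
    rw [pvSlice_dropLast, pvSlice_lastSingleton _ (pvFull_ne_nil cs p ps)]
    rw [← pvFull_chunks cs ps p (fun q hq => (hmem q (by simp [hq])).2) hpw]
    rw [List.map_append, List.map_map]
    congr 1
    apply List.map_congr_left
    intro t _
    simp [pvSlice_dropLast]

-- ===== VERDICT (by name: the statement is the Claim_ definition above) =====
theorem splitByDay_spec : Claim_equal_splitByDay := by
  intro plan _
  show splitByDay plan = splitByDay_alt plan
  unfold splitByDay splitByDay_alt
  -- facts about the marker-position list
  have hmem : ∀ q ∈ (List.range plan.toList.length).filter
      (fun k => decide (pvMarker <+: plan.toList.drop k)),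
      pvMarker <+: plan.toList.drop q ∧ q < plan.toList.length := by
    intro q hqm
    have := List.mem_filter.mp hqm
    exact ⟨by simpa using this.2, List.mem_range.mp this.1⟩
  have hpw : ((List.range plan.toList.length).filter
      (fun k => decide (pvMarker <+: plan.toList.drop k))).Pairwise (fun a b => a + 5 ≤ b) := by
    refine (List.Pairwise.sublist List.filter_sublist List.pairwise_lt_range).imp_of_mem ?_
    intro a b ha hb hab
    by_contra hcon
    exact pvNoOverlap plan.toList a b (hmem a ha).1 hab (by omega) (hmem b hb).1
  -- A's side: fold over the range = fold over the filtered positions = chunks-from list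
  simp only [PySem.List.len_eq, PySem.List.pyRange_zero_natCast, List.foldl_map]
  have hfun : (fun (s : List (List Char) × Int) (k : Nat) =>
      if PySem.List.slice plan.toList (some (k : Int)) (some ((k : Int) + 5)) = pvMarker then
        (s.1 ++ [PySem.List.slice plan.toList (some s.2) (some ((k : Int) - 1))], (k : Int))
      else s)
      = (fun (s : List (List Char) × Int) (k : Nat) =>
      if (fun k => decide (pvMarker <+: plan.toList.drop k)) k = true then
        (s.1 ++ [PySem.List.slice plan.toList (some s.2) (some ((k : Int) - 1))], (k : Int))
      else s) := by
    funext s k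
    by_cases h : pvMarker <+: plan.toList.drop k
    · rw [if_pos ((pvPred_iff _ _).mpr h), if_pos (by simpa using h)]
    · rw [if_neg (fun hc => h ((pvPred_iff _ _).mp hc)), if_neg (by simpa using h)]
  rw [hfun, ← List.foldl_filter
      (p := fun k => decide (pvMarker <+: plan.toList.drop k))
      (f := fun (s : List (List Char) × Int) (k : Nat) =>
        (s.1 ++ [PySem.List.slice plan.toList (some s.2) (some ((k : Int) - 1))], (k : Int)))]
  rw [pvFold_eq]
  -- B's side: split = greedy recursion = position-indexed parts
  rw [pvSplitOn_eq]
  have hspl : pvSpl plan.toList = pvParts plan.toList 0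
      ((List.range plan.toList.length).filter (fun k => decide (pvMarker <+: plan.toList.drop k))) := by
    rw [List.range_eq_range']
    have := pvSpl_parts plan.toList plan.toList.length 0 (by omega)
    simpa using this
  rw [hspl]
  simpa using pvMain plan.toList _ hmem hpw
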